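-- pv_equiv track=rewrite | github.com/L1nwatch/qlcoder | 题目16/test_question16.py | digits_pre_move
-- ===== SOURCE A (Python) =====
-- def digits_pre_move(a_str):
--     num_list = list()
--     other_list = list()
--     for each_char in a_str:
--         if each_char.isdigit():
--             num_list.append(each_char)
--         else:
--             other_list.append(each_char)
--
--     return "".join(num_list + other_list)
-- ===== SOURCE B (Python) =====
-- def digits_pre_move(a_str):
--     return "".join(sorted(a_str, key=lambda c: not c.isdigit()))
-- ===== Notes on version B (the rewrite author's own statement) =====
-- stated objective: idiomatic
-- what changed: Replaces the explicit two-list partition loop with a single stable sort keyed on whether the character is a non-digit, so digits sort before non-digits while each group keeps its input order.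
import Mathlib
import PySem

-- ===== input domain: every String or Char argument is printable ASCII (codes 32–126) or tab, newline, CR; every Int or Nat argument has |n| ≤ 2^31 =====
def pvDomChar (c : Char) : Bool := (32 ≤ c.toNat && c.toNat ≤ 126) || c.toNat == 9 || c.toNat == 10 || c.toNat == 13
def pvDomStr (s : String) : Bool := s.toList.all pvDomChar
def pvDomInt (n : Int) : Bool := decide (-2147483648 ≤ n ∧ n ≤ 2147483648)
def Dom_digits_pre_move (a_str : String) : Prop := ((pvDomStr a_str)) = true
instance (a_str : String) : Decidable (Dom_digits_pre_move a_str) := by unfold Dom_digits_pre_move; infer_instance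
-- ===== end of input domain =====

-- B replaces A's two-list partition loop with one stable sort keyed on non-digit-ness (idiomatic, not faster).

-- ===== PORT A =====
-- A: partition into num_list / other_list with one loop, then join num_list + other_list.
def digits_pre_move (a_str : String) : String :=
  let p := a_str.toList.foldl
    (fun (acc : List Char × List Char) c =>
      if PySem.Chars.isdigit c then (acc.1 ++ [c], acc.2) else (acc.1, acc.2 ++ [c]))
    ([], [])
  String.mk (p.1 ++ p.2)

-- ===== PORT B =====
-- B: "".join(sorted(a_str, key=lambda c: not c.isdigit())) — stable sort, digits (key false) first.
def digits_pre_move_alt (a_str : String) : String :=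
  String.mk (PySem.List.sorted a_str.toList (fun c => !(PySem.Chars.isdigit c)) false)

-- ===== PRECONDITION & SPEC =====
def Spec_digits_pre_move (a_str : String) (out : String) : Prop := out = digits_pre_move_alt a_str
instance (a_str : String) (out : String) : Decidable (Spec_digits_pre_move a_str out) := by unfold Spec_digits_pre_move; infer_instance

-- ===== CLAIM (what is proved, stated in full; the proofs are below) =====
def Claim_equal_digits_pre_move : Prop := ∀ (a_str : String), Dom_digits_pre_move a_str → Spec_digits_pre_move a_str (digits_pre_move a_str)

-- ===== LEMMAS AND PROOFS =====

-- A's loop computes the two filters, appended to the running accumulators.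
theorem pv_foldA (cs : List Char) : ∀ (d o : List Char),
    cs.foldl
      (fun (acc : List Char × List Char) c =>
        if PySem.Chars.isdigit c then (acc.1 ++ [c], acc.2) else (acc.1, acc.2 ++ [c]))
      (d, o)
    = (d ++ cs.filter (fun c => PySem.Chars.isdigit c),
       o ++ cs.filter (fun c => !(PySem.Chars.isdigit c))) := by
  induction cs with
  | nil => intro d o; simp [List.foldl]
  | cons c cs ih =>
    intro d o
    by_cases h : PySem.Chars.isdigit c = true
    · simp [List.foldl, h, ih]
    · simp only [Bool.not_eq_true] at h
      simp [List.foldl, h, ih]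

-- insert a digit: it passes over the digit prefix and stops at the first non-digit.
theorem pv_insert_mid (before : Char → Char → Bool) (x : Char) :
    ∀ (d o : List Char), (∀ y ∈ d, before x y = false) → (∀ y ∈ o, before x y = true) →
    PySem.List.insertBy before x (d ++ o) = d ++ x :: o := by
  intro d
  induction d with
  | nil =>
    intro o _ ho
    cases o with
    | nil => simp [PySem.List.insertBy]
    | cons h t => simp [PySem.List.insertBy, ho h (by simp)]
  | cons a d ih =>
    intro o hd ho
    have ha : before x a = false := hd a (by simp)
    simp [PySem.List.insertBy, ha]
    exact ih o (fun y hy => hd y (by simp [hy])) ho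

-- B's sort (as its defining insertBy fold) equals digits-filter ++ rest-filter.
theorem pv_foldB (cs : List Char) : ∀ (d o : List Char),
    (∀ y ∈ d, PySem.Chars.isdigit y = true) → (∀ y ∈ o, PySem.Chars.isdigit y = false) →
    cs.foldl
      (fun acc x => PySem.List.insertBy
        (fun a b => decide ((!(PySem.Chars.isdigit a)) < (!(PySem.Chars.isdigit b)))) x acc)
      (d ++ o)
    = (d ++ cs.filter (fun c => PySem.Chars.isdigit c))
      ++ (o ++ cs.filter (fun c => !(PySem.Chars.isdigit c))) := by
  induction cs with
  | nil => intro d o _ _; simp [List.foldl]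
  | cons c cs ih =>
    intro d o hd ho
    by_cases h : PySem.Chars.isdigit c = true
    · have hins : PySem.List.insertBy
          (fun a b => decide ((!(PySem.Chars.isdigit a)) < (!(PySem.Chars.isdigit b)))) c (d ++ o)
          = (d ++ [c]) ++ o := by
        rw [pv_insert_mid]
        · simp
        · intro y hy; simp [h, hd y hy]
        · intro y hy; simp [h, ho y hy]
      have := ih (d ++ [c]) o
        (by intro y hy; rcases List.mem_append.mp hy with hy | hy
            · exact hd y hy
            · simp at hy; subst hy; exact h)
        ho
      simp only [List.foldl, hins, this, List.filter_cons, h]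
      simp
    · simp only [Bool.not_eq_true] at h
      have hins : PySem.List.insertBy
          (fun a b => decide ((!(PySem.Chars.isdigit a)) < (!(PySem.Chars.isdigit b)))) c (d ++ o)
          = d ++ (o ++ [c]) := by
        rw [PySem.List.insertBy_of_forall_not_before]
        · simp
        · intro y _; simp [h]
      have := ih d (o ++ [c]) hd
        (by intro y hy; rcases List.mem_append.mp hy with hy | hy
            · exact ho y hy
            · simp at hy; subst hy; exact h)
      simp only [List.foldl, hins, this, List.filter_cons, h]
      simp

theorem pv_sorted_eq (cs : List Char) :
    PySem.List.sorted cs (fun c => !(PySem.Chars.isdigit c)) false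
    = cs.filter (fun c => PySem.Chars.isdigit c)
      ++ cs.filter (fun c => !(PySem.Chars.isdigit c)) := by
  rw [PySem.List.sorted_eq_foldl_insertBy]
  have := pv_foldB cs [] [] (by simp) (by simp)
  simpa using this

-- ===== VERDICT (by name: the statement is the Claim_ definition above) =====
theorem digits_pre_move_spec : Claim_equal_digits_pre_move := by
  intro a_str _
  unfold Spec_digits_pre_move digits_pre_move digits_pre_move_alt
  rw [pv_sorted_eq]
  have := pv_foldA a_str.toList [] []
  simp [this]
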